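-- pv_equiv track=rewrite | github.com/RengaRengarajan/AlgorithmQuestions | Algorithms01.py | permute_question_mark
-- ===== SOURCE A (Python) =====
-- def permute_question_mark(s):
--     # A string contains '0', '1' and '?'
--     # the '?' can be either '0' or '1'
--     # Find all the possible combinations for a given string
--     if s.find('?') == -1:
--         return [s]
--     else:
--         result = []
--         s1 = s.replace('?', '0', 1)     # replace the first '?' by '0'
--         s2 = s.replace('?', '1', 1)     # replace the first '?' by '1'
--         result += permute_question_mark(s1)
--         result += permute_question_mark(s2)
--         return result
-- ===== SOURCE B (Python) =====
-- def permute_question_mark(s):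
--     # Single left-to-right pass: extend every partial combination with the
--     # next character, branching on '0'/'1' at each '?'.
--     combos = ['']
--     for c in s:
--         if c == '?':
--             combos = [p + b for p in combos for b in '01']
--         else:
--             combos = [p + c for p in combos]
--     return combos
-- ===== Notes on version B (the rewrite author's own statement) =====
-- stated objective: alternative
-- what changed: Replaced the binary recursion (replace the first question mark by each digit and recurse on the whole string) by a single left-to-right fold that extends every partial combination character by character, branching at each question mark.
import Mathlib
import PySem

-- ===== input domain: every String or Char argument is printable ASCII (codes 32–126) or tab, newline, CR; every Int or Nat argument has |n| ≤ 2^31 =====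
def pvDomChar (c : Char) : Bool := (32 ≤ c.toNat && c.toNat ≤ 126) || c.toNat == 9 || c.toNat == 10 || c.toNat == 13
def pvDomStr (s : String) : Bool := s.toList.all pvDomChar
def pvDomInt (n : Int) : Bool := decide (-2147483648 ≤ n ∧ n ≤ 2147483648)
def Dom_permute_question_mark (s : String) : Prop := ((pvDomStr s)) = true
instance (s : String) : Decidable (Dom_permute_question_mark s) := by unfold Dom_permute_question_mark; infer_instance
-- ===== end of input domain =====

-- B replaces A's binary recursion by one left-to-right fold over the string (objective: alternative decomposition, same enumeration order).

-- ===== PORT A =====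
-- s.replace('?', b, 1): replace the FIRST occurrence; exact for the single-character pattern '?'
def pvReplaceFirst : List Char → Char → List Char
  | [], _ => []
  | c :: cs, b => if c = '?' then b :: cs else c :: pvReplaceFirst cs b

-- termination measure for the port: replacing the first '?' decreases the number of '?'
theorem pvCount_replaceFirst (l : List Char) (b : Char) (hb : b ≠ '?') (h : '?' ∈ l) :
    (pvReplaceFirst l b).count '?' < l.count '?' := by
  induction l with
  | nil => cases h
  | cons c cs ih =>
    by_cases hc : c = '?'
    · subst hc
      simp [pvReplaceFirst, hb]
    · have hm : '?' ∈ cs := by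
        cases h with
        | head => exact absurd rfl hc
        | tail _ h => exact h
      simpa [pvReplaceFirst, hc, List.count_cons, Ne.symm hc] using ih hm

theorem pvFind_mem (l : List Char) (h : ¬ PySem.Chars.find l ['?'] = -1) : '?' ∈ l :=
  List.singleton_sublist.mp ((PySem.Chars.find_ne_neg_one_iff l ['?']).mp h).sublist

-- A's recursion, on the character list (find('?') == -1 ⇔ '?' does not occur)
def pvPermAux (l : List Char) : List (List Char) :=
  if h : PySem.Chars.find l ['?'] = -1 then [l]
  else pvPermAux (pvReplaceFirst l '0') ++ pvPermAux (pvReplaceFirst l '1')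
termination_by l.count '?'
decreasing_by
  · exact pvCount_replaceFirst l '0' (by decide) (pvFind_mem l h)
  · exact pvCount_replaceFirst l '1' (by decide) (pvFind_mem l h)

def permute_question_mark (s : String) : List String :=
  (pvPermAux s.toList).map String.ofList

-- ===== PORT B =====
-- one pass: extend every partial combination by the next character, branching at '?'
def permute_question_mark_alt (s : String) : List String :=
  (s.toList.foldl (fun combos c =>
      if c = '?' then combos.flatMap (fun p => ['0', '1'].map (fun b => p ++ [b]))
      else combos.map (fun p => p ++ [c])) [[]]).map String.ofList

-- ===== PRECONDITION & SPEC =====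
def Spec_permute_question_mark (s : String) (out : List String) : Prop := out = permute_question_mark_alt s
instance (s : String) (out : List String) : Decidable (Spec_permute_question_mark s out) := by unfold Spec_permute_question_mark; infer_instance

-- ===== CLAIM (what is proved, stated in full; the proofs are below) =====
def Claim_equal_permute_question_mark : Prop := ∀ (s : String), Dom_permute_question_mark s → Spec_permute_question_mark s (permute_question_mark s)

-- ===== LEMMAS AND PROOFS =====

-- canonical enumeration both ports are reduced to
def pvGen : List Char → List (List Char)
  | [] => [[]]
  | c :: cs =>
    if c = '?' then (pvGen cs).map ('0' :: ·) ++ (pvGen cs).map ('1' :: ·)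
    else (pvGen cs).map (c :: ·)

theorem pvGen_no_q (l : List Char) (h : '?' ∉ l) : pvGen l = [l] := by
  induction l with
  | nil => rfl
  | cons c cs ih =>
    have hc : ¬ c = '?' := fun hc => h (hc ▸ List.mem_cons_self ..)
    simp [pvGen, hc, ih (fun hm => h (List.mem_cons_of_mem _ hm))]

theorem pvGen_split (l : List Char) (h : '?' ∈ l) :
    pvGen l = pvGen (pvReplaceFirst l '0') ++ pvGen (pvReplaceFirst l '1') := by
  induction l with
  | nil => cases h
  | cons c cs ih =>
    by_cases hc : c = '?'
    · subst hc
      simp [pvGen, pvReplaceFirst]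
    · have hm : '?' ∈ cs := by
        cases h with
        | head => exact absurd rfl hc
        | tail _ h => exact h
      simp [pvGen, pvReplaceFirst, hc, ih hm]

theorem pvPermAux_eq_gen (l : List Char) : pvPermAux l = pvGen l := by
  by_cases h : PySem.Chars.find l ['?'] = -1
  · have hm : '?' ∉ l := fun hmem =>
      ((PySem.Chars.find_eq_neg_one_iff l ['?']).mp h)
        (by obtain ⟨u, v, rfl⟩ := List.append_of_mem hmem
            exact ⟨u, v, by simp⟩)
    rw [pvPermAux, dif_pos h, pvGen_no_q l hm]
  · rw [pvPermAux, dif_neg h, pvPermAux_eq_gen, pvPermAux_eq_gen,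
      ← pvGen_split l (pvFind_mem l h)]
termination_by l.count '?'
decreasing_by
  · exact pvCount_replaceFirst l '0' (by decide) (pvFind_mem l h)
  · exact pvCount_replaceFirst l '1' (by decide) (pvFind_mem l h)

theorem pvFoldl_eq_gen (l : List Char) (combos : List (List Char)) :
    l.foldl (fun combos c =>
      if c = '?' then combos.flatMap (fun p => ['0', '1'].map (fun b => p ++ [b]))
      else combos.map (fun p => p ++ [c])) combos
    = combos.flatMap (fun p => (pvGen l).map (p ++ ·)) := by
  induction l generalizing combos with
  | nil => simp [pvGen]
  | cons c cs ih =>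
    by_cases hc : c = '?'
    · subst hc
      rw [List.foldl_cons, if_pos rfl, ih]
      simp [pvGen, List.flatMap_assoc, List.map_map, Function.comp_def,
        List.append_assoc]
    · rw [List.foldl_cons, if_neg hc, ih]
      simp [pvGen, hc, List.flatMap_map, List.map_map, Function.comp_def,
        List.append_assoc]

-- ===== VERDICT (by name: the statement is the Claim_ definition above) =====
theorem permute_question_mark_spec : Claim_equal_permute_question_mark := by
  intro s _
  unfold Spec_permute_question_mark permute_question_mark permute_question_mark_alt
  rw [pvPermAux_eq_gen, pvFoldl_eq_gen]
  simp
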